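/-
  SEGMENT .3 OF `vorbis_decode_packet_rest` (0x110e7e–0x110ffb + 0x110c5d–0x110c8d + 0x110e5b–0x110e6f, the head of the partition
  loop; stb_vorbis_fixed.c 3242–3250) SPLIT AT THE TWO JOINS OF ITS INLINE `DECODE_RAW`: the assertion at the two new cut points,
  the claims of the three children, the composition `Seg3.of_parts` (pure logic: `ReachVia.trans`; no machine step), and the
  lemmas about an inline DECODE_RAW that segment .4 (0x110d86–0x110e07 + 0x110c92–0x110caa, the same shape) needs too.

      .3a  0x110e7e–0x110f35 + 0x110c5d–0x110c65 + 0x110e5b–0x110e6f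
                                     `j ≥ partitions` → .5 (`At5`); `pclass`, `cdim`, `cbits`, `csub` (the four spills);
                                     `cbits = 0`: `cval = 0`, `k = 0` → .4 (`At4`); otherwise `c = f->codebooks + masterbook`,
                                     `if (f->valid_bits < 10) prep_huffman(f)` → the join 0x110f3b (`At3Mid … at_110f3b`)
      .3b  0x110f3b–0x110fbc + 0x110c6a–0x110c8d
                                     DECODE_RAW proper: `var = c->fast_huffman[f->acc & 1023]`; `var ≥ 0`: `f->acc >>= n`,
                                     `f->valid_bits −= n`, negative → `valid_bits = 0, var = −1`; `var < 0`:
                                     `var = codebook_decode_scalar_raw(f, c)` → the join 0x110fc2 (`At3Mid … at_110fc2`, `r12d = var`)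
      .3c  0x110fc2–0x110ffb + 0x110e60–0x110e6f
                                     `if (c->sparse) var = c->sorted_values[var]`, `k = 0`, `[0x18] = g`, `[0] = cval` → .4 (`At4`)

  THE SHAPE OF THE CUT ASSERTION. `At3Mid` is RELATIVE to `v`, the state at the segment's entry 0x110e7e (a ghost of the children .3b
  and .3c, which also get `At3 … v` as a hypothesis): it says what changed since `v` (the memory only inside `seg3Wins`, no shadow
  byte), not the thirty fields of STABLE again. The exits `At4` / `At5` are built from `At3 … v` and these facts once, in .3a and .3c.

  WHAT IS LIVE AT THE TWO JOINS (read off c/vorbis_f.dis):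
      0x110f3b  reads rbp (= f: `[rbp + 0x6e4]` acc, `[rbp + 0x6e8]` valid_bits), r13 (= c: `[r13 + rbx*2]` fast_huffman,
                `[r13 + 8]` codeword_lengths; `rsi` of the call); r14, rbx, r12, rax, rcx are written before they are read.
                r15 (= g) is carried to 0x110e66. Slots: `[0x38] [0x10] [0x2c] [0x30]` (written by .3a, read by segment .4).
      0x110fc2  reads r13 (= c: `[r13 + 0x1b]` sparse, `[r13 + 0x838]` sorted_values), r12d (= var), r15 (stored to `[0x18]`);
                rbp = f is needed by `At4.rbp`; r14 and rbx are written before they are read.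
-/
import Vorbis.Spec.PacketRest
import Vorbis.Spec.PacketRestFrame
import Vorbis.LabelsAt
namespace Vorbis.Spec.vorbis_decode_packet_rest
open X86 X86.User Asan Vorbis Vorbis.Spec

/-! ### The footprint of the segment and the four spills of its head -/

/-- The windows segment .3 and its two callees may write (`u` = the function's entry state): three windows of the own stack area
(below the slot `[rsp + 0x3c]`, sparing the slots `[rsp + 8]` = offset and `[rsp + 0x20]` = finalY) and the bit reader's windows
of `*f` (`Reader.winsBits`: the stream position, `bytes_in_seg` / `first_decode` …, `acc` at `f + 1764`, `valid_bits` at `f + 1768`). -/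
def seg3Wins (u : State) : List Span :=
  [⟨(u.reg .rsp).toNat - 3856, (u.reg .rsp).toNat - 2992⟩,
   ⟨(u.reg .rsp).toNat - 2984, (u.reg .rsp).toNat - 2968⟩,
   ⟨(u.reg .rsp).toNat - 2956, (u.reg .rsp).toNat - 2940⟩,
   ⟨fOf u + 48, fOf u + 56⟩, ⟨fOf u + 84, fOf u + 96⟩, ⟨fOf u + 136, fOf u + 144⟩,
   ⟨fOf u + 1484, fOf u + 1749⟩, ⟨fOf u + 1752, fOf u + 1784⟩]

/-- A window of `seg3Wins`, as arithmetic (for `omega`). -/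
theorem seg3Wins_mem {u : State} {s : Span} (h : s ∈ seg3Wins u) :
    ((u.reg .rsp).toNat - 3856 = s.lo ∧ s.hi = (u.reg .rsp).toNat - 2992) ∨
    ((u.reg .rsp).toNat - 2984 = s.lo ∧ s.hi = (u.reg .rsp).toNat - 2968) ∨
    ((u.reg .rsp).toNat - 2956 = s.lo ∧ s.hi = (u.reg .rsp).toNat - 2940) ∨
    (fOf u + 48 = s.lo ∧ s.hi = fOf u + 56) ∨ (fOf u + 84 = s.lo ∧ s.hi = fOf u + 96) ∨
    (fOf u + 136 = s.lo ∧ s.hi = fOf u + 144) ∨ (fOf u + 1484 = s.lo ∧ s.hi = fOf u + 1749) ∨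
    (fOf u + 1752 = s.lo ∧ s.hi = fOf u + 1784) := by
  simp only [seg3Wins, List.mem_cons, List.mem_nil_iff, or_false] at h
  rcases h with rfl | rfl | rfl | rfl | rfl | rfl | rfl | rfl <;> simp only [and_self, true_or, or_true]

/-- **The four spill slots written by the head of segment .3** (0x110eab, 0x110ec3, 0x110eda, 0x110ee8; line 3243 – 3246), read in
the state `w`, in terms of the floor `g` read in `v.mem` (the memory at the segment's entry): `[0x38] = pclass`, `[0x10] = cdim`,
`[0x2c] = cbits`, `[0x30] = csub = (1 << cbits) − 1` as the machine computes it (`At4.slot_csub` wants `2 ^ cbits − 1`: `mask_toNat`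
with FL6 `cbits ≤ 3`). The addresses are over the function's entry rsp: the steady rsp is `u.rsp − 3000`. -/
structure Head3Slots (u v w : State) (g pc : Nat) : Prop where
  /-- `[rsp + 0x38] = pclass` (0x110eab) -/
  s38 : w.mem.readLE (u.reg .rsp - 2944) 4 = pc
  /-- `[rsp + 0x10] = cdim = g->class_dimensions[pclass]` (0x110ec3) -/
  s10 : w.mem.readLE (u.reg .rsp - 2984) 4 = Floor1.class_dimensions v.mem g pc
  /-- `[rsp + 0x2c] = cbits = g->class_subclasses[pclass]` (0x110eda) -/
  s2c : w.mem.readLE (u.reg .rsp - 2956) 4 = Floor1.class_subclasses v.mem g pc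
  /-- `[rsp + 0x30] = csub = (1 << cbits) − 1` (0x110ee8: `shl eax, cl ; sub eax, 1`) -/
  s30 : w.mem.readLE (u.reg .rsp - 2952) 4 = (1#32 <<< (Floor1.class_subclasses v.mem g pc % 32) - 1#32).toNat

/-- **The assertion at the two joins of the inline DECODE_RAW of segment .3** (`pcAddr` = 0x110f3b, after the refill of the bit
buffer, or 0x110fc2, after DECODE_RAW with `r12d = var`), RELATIVE to `v`, the state at the segment's entry 0x110e7e (`u` = the
function's entry state, `Blk = RunBlk Ar len`): the steady stack pointer, `rbp` and `r15` as at the segment's entry (`= f`, `= g`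
by `At3.rbp`, `At3.g`), `r13 = c` (the master book of the class), the text, DF / MXCSR, the memory changed only inside `seg3Wins`
since `v`, no shadow byte written since `v`, `Bits f` in the CURRENT memory (acc / valid_bits: V1), the four spills of the head.
Nothing about r12 (the result of DECODE_RAW is a separate conjunct of the claims), rax, rbx, rcx, r14 (dead at both joins). -/
structure At3Mid (u₀ u v : State) (Blk : Block → Prop) (len g pc c : Nat) (pcAddr : Word) (w : State) : Prop where
  /-- the join: `at_110f3b` or `at_110fc2` -/
  rip : w.rip = pcAddr
  /-- the steady stack pointer of the function (`STABLE.rsp`) -/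
  rsp : w.reg .rsp = u.reg .rsp - 3000
  /-- `rbp` is what it was at the segment's entry (`f`: `At3.rbp`); callee-saved across prep_huffman / codebook_decode_scalar_raw -/
  rbp : w.reg .rbp = v.reg .rbp
  /-- `r15` is what it was at the segment's entry (`g`: `At3.g`); stored to `[rsp + 0x18]` at 0x110e66 -/
  r15 : w.reg .r15 = v.reg .r15
  /-- `r13 = c = f->codebooks + g->class_masterbooks[pclass]` (0x110f1e) -/
  r13 : w.reg .r13 = addr c
  /-- the text is the image's -/
  code : Mem.EqOn Vorbis.L.textLo Vorbis.L.textHi u₀.mem w.mem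
  /-- DF = 0, MXCSR masks -/
  abi : abiInv w
  /-- since the segment's entry the memory changed only inside the segment's windows -/
  same : Mem.SameExcept (seg3Wins u) v.mem w.mem
  /-- no shadow byte was written since the segment's entry -/
  un : ShadowUntouched v.mem w.mem
  /-- the bit reader's invariant of `*f` in the current memory (after prep_huffman / the stores of `acc`, `valid_bits`) -/
  bits : Bits Blk len w.mem (fOf u)
  /-- the four spills of the head (`pclass`, `cdim`, `cbits`, `csub`) -/
  slots : Head3Slots u v w g pc

/-! ### The claims of the three children -/

/-- **Segment .3a, 0x110e7e–0x110f35 + 0x110c5d–0x110c65 + 0x110e5b–0x110e6f** (lines 3242–3249 and the refill of DECODE_RAW):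
`j ≥ partitions` → .5; the four spills; `cbits = 0`: `cval = 0`, `k = 0` → .4; otherwise `r13 = c`, the master book number `mb` of
the class (`< codebook_count`: FL6), `if (f->valid_bits < 10) prep_huffman(f)`, and the join 0x110f3b (`At3Mid … at_110f3b`) with
`g = r15` and `pc = pcl[j]` of the segment's entry. -/
def Seg3a (Lay : Layout) (μ : Microarch) (u₀ : State) : Prop :=
  ∀ (others : List Obj) (frames : List (Nat × FrameLayout)) (len : Nat) (Ar : Arena) (stored room : Int)
      (mode : Nat) (ysz : Nat → Nat) (u : State) (ret : Word) (i j : Nat) (v : State),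
    (At3 u₀ others frames len Ar stored room mode ysz u ret i j v) →
    ReachVia Lay μ Vorbis.WayInv v (fun w =>
      At5 u₀ others frames len Ar stored room mode ysz u ret i w ∨
      At4 u₀ others frames len Ar stored room mode ysz u ret i j w ∨
      (j < Floor1.partitions v.mem (v.reg .r15).toNat ∧
        ∃ mb : Nat, (mb : Int) < stb_vorbis.codebook_count v.mem (fOf u) ∧
          At3Mid u₀ u v (RunBlk Ar len) len (v.reg .r15).toNat
            (Floor1.partition_class_list v.mem (v.reg .r15).toNat j) (stb_vorbis.codebooks_at v.mem (fOf u) mb)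
            Vorbis.L.vorbis_decode_packet_rest.at_110f3b w))

/-- **Segment .3b, 0x110f3b–0x110fbc + 0x110c6a–0x110c8d: DECODE_RAW, inline** (line 3250; 5 check sites, the call of
codebook_decode_scalar_raw, three paths): from the join 0x110f3b (`Bits f` in the current memory, `r13 = c` = book `mb` of `f`) to
the join 0x110fc2 with `r12d = var`, a DECODE_RAW result of `c` (`var = −1 ∨ 0 ≤ var < N(c)`, `c` read in the memory of the
segment's entry: the book is not written). `v` and `At3 … v` are ghosts (where the invariants of `*f` come from); `g`, `pc` are
only carried. -/
def Seg3b (Lay : Layout) (μ : Microarch) (u₀ : State) : Prop :=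
  ∀ (others : List Obj) (frames : List (Nat × FrameLayout)) (len : Nat) (Ar : Arena) (stored room : Int)
      (mode : Nat) (ysz : Nat → Nat) (u : State) (ret : Word) (i j : Nat) (v : State),
    (At3 u₀ others frames len Ar stored room mode ysz u ret i j v) →
    ∀ (g pc mb : Nat) (m : State),
    ((mb : Int) < stb_vorbis.codebook_count v.mem (fOf u)) →
    (At3Mid u₀ u v (RunBlk Ar len) len g pc (stb_vorbis.codebooks_at v.mem (fOf u) mb)
      Vorbis.L.vorbis_decode_packet_rest.at_110f3b m) →
    ReachVia Lay μ Vorbis.WayInv m (fun w =>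
      At3Mid u₀ u v (RunBlk Ar len) len g pc (stb_vorbis.codebooks_at v.mem (fOf u) mb)
        Vorbis.L.vorbis_decode_packet_rest.at_110fc2 w ∧
      DecodeRawResult v.mem (stb_vorbis.codebooks_at v.mem (fOf u) mb) (s32 (w.reg .r12)))

/-- **Segment .3c, 0x110fc2–0x110ffb + 0x110e60–0x110e6f** (line 3250, the translation step of DECODE, and `k = 0`): `if (c->sparse)
var = c->sorted_values[var]` (with `var = −1` the load reads the sentinel word before the array: K4), `r14d = 0`, `[0x18] = g`,
`[0] = cval` → .4 (`At4`). The disjunct `At5` is never taken: it keeps the exit shape of the parent. -/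
def Seg3c (Lay : Layout) (μ : Microarch) (u₀ : State) : Prop :=
  ∀ (others : List Obj) (frames : List (Nat × FrameLayout)) (len : Nat) (Ar : Arena) (stored room : Int)
      (mode : Nat) (ysz : Nat → Nat) (u : State) (ret : Word) (i j : Nat) (v : State),
    (At3 u₀ others frames len Ar stored room mode ysz u ret i j v) →
    ∀ (mb : Nat) (m : State),
    (j < Floor1.partitions v.mem (v.reg .r15).toNat) →
    ((mb : Int) < stb_vorbis.codebook_count v.mem (fOf u)) →
    (At3Mid u₀ u v (RunBlk Ar len) len (v.reg .r15).toNat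
      (Floor1.partition_class_list v.mem (v.reg .r15).toNat j) (stb_vorbis.codebooks_at v.mem (fOf u) mb)
      Vorbis.L.vorbis_decode_packet_rest.at_110fc2 m) →
    (DecodeRawResult v.mem (stb_vorbis.codebooks_at v.mem (fOf u) mb) (s32 (m.reg .r12))) →
    ReachVia Lay μ Vorbis.WayInv m (fun w =>
      At5 u₀ others frames len Ar stored room mode ysz u ret i w ∨
      At4 u₀ others frames len Ar stored room mode ysz u ret i j w)

/-- **The composition of segment .3 from its three parts**: .3a leaves to .5 / .4 or reaches the join 0x110f3b; .3b takes it to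
the join 0x110fc2 with a DECODE_RAW result in r12d; .3c reaches `At4`. Pure logic (`ReachVia.trans`). -/
theorem Seg3.of_parts {Lay : Layout} {μ : Microarch} {u₀ : State}
    (ha : Seg3a Lay μ u₀) (hb : Seg3b Lay μ u₀) (hc : Seg3c Lay μ u₀) : Seg3 Lay μ u₀ := by
  intro others frames len Ar stored room mode ysz u ret i j v hat
  refine (ha others frames len Ar stored room mode ysz u ret i j v hat).trans ?_
  intro wa hwa
  rcases hwa with h5 | h4 | ⟨hlt, mb, hmb, hmid⟩
  · exact ReachVia.done (Or.inl h5)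
  · exact ReachVia.done (Or.inr h4)
  · refine (hb others frames len Ar stored room mode ysz u ret i j v hat _ _ mb wa hmb hmid).trans ?_
    intro wb hwb
    exact hc others frames len Ar stored room mode ysz u ret i j v hat mb wb hlt hmb hwb.1 hwb.2

/-! ### The footprint through a call, the spills through a call -/

/-- **The segment's footprint through a callee's** (prep_huffman, codebook_decode_scalar_raw: ONE stack window `[lo, hi)` below the
slot `[rsp + 8]` and the bit reader's five windows of `*f`, exactly the `w_same` that `v_after_call` gives after
`simp only [X86.User.Spec.footprint, vspec, w_rsp_<a>, w_rdi_<a>, hT0] at w_same`). -/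
theorem seg3Wins_through_callee {u : State} {m0 m1 m2 : Mem} {lo hi : Nat} (h : Mem.SameExcept (seg3Wins u) m0 m1)
    (hs : Mem.SameExcept [⟨lo, hi⟩, ⟨fOf u + 48, fOf u + 56⟩, ⟨fOf u + 84, fOf u + 96⟩, ⟨fOf u + 136, fOf u + 144⟩,
      ⟨fOf u + 1484, fOf u + 1749⟩, ⟨fOf u + 1752, fOf u + 1784⟩] m1 m2)
    (h1 : (u.reg .rsp).toNat - 3856 ≤ lo) (h2 : hi ≤ (u.reg .rsp).toNat - 2992) : Mem.SameExcept (seg3Wins u) m0 m2 := by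
  apply h.step_same hs
  intro w hw a k1 k2
  simp only [List.mem_cons, List.mem_nil_iff, or_false] at hw
  rcases hw with rfl | rfl | rfl | rfl | rfl | rfl
  · refine ⟨⟨(u.reg .rsp).toNat - 3856, (u.reg .rsp).toNat - 2992⟩, ?_, ?_, ?_⟩
    · simp only [seg3Wins, List.mem_cons, true_or]
    · simp only [] at k1 ⊢
      omega
    · simp only [] at k2 ⊢
      omega
  all_goals
    refine ⟨_, ?_, k1, k2⟩
    simp only [seg3Wins, List.mem_cons, List.mem_nil_iff, true_or, or_true]

/-- A store into the callee area of the own frame (the return address of a call: `a = u.rsp − 3008`, `k = 8`) stays inside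
`seg3Wins`. -/
theorem seg3Wins_push {u : State} {m0 m1 : Mem} (h : Mem.SameExcept (seg3Wins u) m0 m1) (a : Word) (k x : Nat)
    (h1 : (u.reg .rsp).toNat - 3856 ≤ a.toNat) (h2 : a.toNat + k ≤ (u.reg .rsp).toNat - 2992) :
    Mem.SameExcept (seg3Wins u) m0 (m1.writeLE a k x) := by
  have := a.toNat_lt
  have := (u.reg .rsp).toNat_lt
  apply h.step_writeLE a k x (by omega)
  refine ⟨⟨(u.reg .rsp).toNat - 3856, (u.reg .rsp).toNat - 2992⟩, ?_, h1, h2⟩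
  simp only [seg3Wins, List.mem_cons, true_or]

/-- The spills in a state with the same memory (a step that writes registers only). -/
theorem Head3Slots.of_mem_eq {u v w w' : State} {g pc : Nat} (h : Head3Slots u v w g pc) (e : w'.mem = w.mem) :
    Head3Slots u v w' g pc := by
  obtain ⟨h1, h2, h3, h4⟩ := h
  refine ⟨?_, ?_, ?_, ?_⟩
  · rw [e]
    exact h1
  · rw [e]
    exact h2
  · rw [e]
    exact h3
  · rw [e]
    exact h4

/-- **The spills over a call**: the push of the return address (`e`: a store below the steady rsp) and the callee's footprint
(`hs`: one stack window below the steady rsp and the bit reader's windows of `*f`; `*f` is off the stack region: `hoff` =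
`DecodeInv.objOff`). `hroom` / `htop` = `AtEntry.room` / `.top` of the function (`he_room`, `he_top` after `v_entry`). -/
theorem Head3Slots.through {u v w w1 w' : State} {g pc lo hi : Nat} {a : Word} {k x : Nat} (h : Head3Slots u v w g pc)
    (e : w1.mem = w.mem.writeLE a k x) (ha : a.toNat + k ≤ (u.reg .rsp).toNat - 3000)
    (hs : Mem.SameExcept [⟨lo, hi⟩, ⟨fOf u + 48, fOf u + 56⟩, ⟨fOf u + 84, fOf u + 96⟩, ⟨fOf u + 136, fOf u + 144⟩,
      ⟨fOf u + 1484, fOf u + 1749⟩, ⟨fOf u + 1752, fOf u + 1784⟩] w1.mem w'.mem)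
    (h2 : hi ≤ (u.reg .rsp).toNat - 3000) (hroom : 0x700000 + 3856 ≤ (u.reg .rsp).toNat)
    (htop : (u.reg .rsp).toNat + 8 ≤ 0x800000) (hoff : fOf u + 1808 ≤ 0x700000 ∨ 0x800000 ≤ fOf u) :
    Head3Slots u v w' g pc := by
  obtain ⟨h1, h3, h4, h5⟩ := h
  have key : ∀ (b : Word), (u.reg .rsp).toNat - 3000 ≤ b.toNat → b.toNat + 4 ≤ (u.reg .rsp).toNat →
      w'.mem.readLE b 4 = w.mem.readLE b 4 := by
    intro b k1 k2
    have e1 : w'.mem.readLE b 4 = w1.mem.readLE b 4 := by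
      apply hs.readLE b 4 (by omega)
      intro s hs'
      simp only [List.mem_cons, List.mem_nil_iff, or_false] at hs'
      rcases hs' with rfl | rfl | rfl | rfl | rfl | rfl <;> simp only [] <;> omega
    rw [e1, e]
    apply Mem.readLE_writeLE_disjoint_noWrap
    · show a.toNat + k ≤ 2 ^ 64
      omega
    · show b.toNat + 4 ≤ 2 ^ 64
      omega
    · omega
  refine ⟨?_, ?_, ?_, ?_⟩
  · rw [key _ (by u_omega) (by u_omega)]
    exact h1
  · rw [key _ (by u_omega) (by u_omega)]
    exact h3
  · rw [key _ (by u_omega) (by u_omega)]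
    exact h4
  · rw [key _ (by u_omega) (by u_omega)]
    exact h5

/-! ### Bit-level facts of an inline DECODE_RAW (segments .3b and .4) -/

/-- `and ebx, 0x3ff` as a number: `acc & FAST_HUFFMAN_TABLE_MASK = acc % 1024`. -/
theorem and_1023_toNat (A : Nat) : (BitVec.ofNat 32 A &&& 1023#32).toNat = A % 1024 := by
  rw [BitVec.toNat_and, BitVec.toNat_ofNat]
  have e : (1023#32).toNat = 2 ^ 10 - 1 := by decide
  rw [e, Nat.and_two_pow_sub_one_eq_mod]
  omega

/-- **The address of `c->fast_huffman[acc & 1023]` as the walker computes it** (`and ebx, 0x3ff ; add rbx, 0x18 ; lea rdi,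
[r13 + rbx*2]`, 0x110f51 … 0x110f5b; `A` = the dword `f->acc`, `fast_huffman` at `c + 48`): a rewrite fact for `u_walk`'s list. -/
theorem fast_huffman_addr (c A : Nat) :
    addr c + (Word.ofBV (BitVec.setWidth 64 (BitVec.ofNat 32 A &&& 1023#32)) + 24) * 2 = addr (c + 48 + 2 * (A % 1024)) := by
  rw [ofBV_eq_addr _ (Nat.le_refl _)]
  have e : (BitVec.setWidth 64 (BitVec.ofNat 32 A &&& 1023#32)).toNat = A % 1024 := by
    rw [BitVec.toNat_setWidth, and_1023_toNat]
    omega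
  rw [e, addr_add_lit, addr_mul_lit, addr_add_addr]
  congr 1
  omega

/-- **`movsx rbx, bx` of a non-negative `fast_huffman` entry** (0x110f65 `movzx ebx, word [..]`, 0x110f81 `movsx rbx, bx`, on the
path where `test r12d, r12d` was not negative: `FH < 32768`): the index into `codeword_lengths` is the number `FH`. -/
theorem sx16_addr (FH : Nat) (h : FH < 32768) :
    Word.ofBV (BitVec.signExtend 64 (BitVec.setWidth 16 (BitVec.zeroExtend 32 (BitVec.ofNat 16 FH)))) = addr FH := by
  have e : (BitVec.setWidth 16 (BitVec.zeroExtend 32 (BitVec.ofNat 16 FH))).toInt = (FH : Int) := by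
    rw [BitVec.toInt_eq_toNat_cond]
    simp only [BitVec.toNat_setWidth, BitVec.toNat_ofNat]
    have e1 : FH % 2 ^ 16 % 2 ^ 32 % 2 ^ 16 = FH := by omega
    rw [e1]
    have e2 : 2 * FH < 2 ^ 16 := by omega
    simp only [e2, if_true]
  rw [ofBV_signExtend64, e, word_nonneg _ (by omega)]
  rfl

/-- **The sign test of a `fast_huffman` entry** (0x110f6b `movsx r12d, bx`; 0x110f6f `test r12d, r12d`; `js`): the signed dword is
the signed 16-bit value, so "not negative" means `FH < 32768`. -/
theorem sx16_toInt (FH : Nat) (h : FH < 65536) :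
    (BitVec.signExtend 32 (BitVec.setWidth 16 (BitVec.zeroExtend 32 (BitVec.ofNat 16 FH)))).toInt =
      if FH < 32768 then (FH : Int) else (FH : Int) - 65536 := by
  have e0 : BitVec.setWidth 16 (BitVec.zeroExtend 32 (BitVec.ofNat 16 FH)) = BitVec.ofNat 16 FH := by
    apply BitVec.eq_of_toNat_eq
    simp only [BitVec.toNat_setWidth, BitVec.toNat_ofNat]
    omega
  rw [e0, BitVec.toInt_signExtend_of_le (by decide), BitVec.toInt_eq_toNat_cond, BitVec.toNat_ofNat]
  have e1 : FH % 2 ^ 16 = FH := by omega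
  rw [e1]
  by_cases hlt : FH < 32768
  · have e2 : 2 * FH < 2 ^ 16 := by omega
    simp only [e2, hlt, if_true]
  · have e2 : ¬ 2 * FH < 2 ^ 16 := by omega
    simp only [e2, hlt, if_false]
    omega

/-- **The sign of a `fast_huffman` entry as the branch `js` 0x110f72 has it** (`movzx ebx, word ; movsx r12d, bx ; test r12d, r12d`:
the walker's `hbr_110f72 : (…).msb = false / true`): the sign bit of the dword is the sign bit of the 16-bit load `FH`. -/
theorem sx16_msb (FH : Nat) (h : FH < 65536) :
    (BitVec.signExtend 32 (BitVec.setWidth 16 (BitVec.zeroExtend 32 (BitVec.ofNat 16 FH)))).msb = decide (32768 ≤ FH) := by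
  have e0 : BitVec.setWidth 16 (BitVec.zeroExtend 32 (BitVec.ofNat 16 FH)) = BitVec.ofNat 16 FH := by
    apply BitVec.eq_of_toNat_eq
    simp only [BitVec.toNat_setWidth, BitVec.toNat_ofNat]
    omega
  have e1 : (BitVec.signExtend 32 (BitVec.ofNat 16 FH)).msb = (BitVec.ofNat 16 FH).msb := by
    bv_decide
  have e2 : (BitVec.ofNat 16 FH).toNat = FH := by
    rw [BitVec.toNat_ofNat]
    omega
  rw [e0, e1, BitVec.msb_eq_decide, e2]

/-- **`r12d = var` on the fast path** (`movsx r12d, bx` of a non-negative entry, `FH < 32768`): the register is the number `FH`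
(so `s32 r12 = FH`, and `Codebook.fast_huffman mem c k = sint16 FH = FH`). -/
theorem sx16_addr32 (FH : Nat) (h : FH < 32768) :
    Word.ofBV (BitVec.signExtend 32 (BitVec.setWidth 16 (BitVec.zeroExtend 32 (BitVec.ofNat 16 FH)))) = addr FH := by
  have e0 : BitVec.setWidth 16 (BitVec.zeroExtend 32 (BitVec.ofNat 16 FH)) = BitVec.ofNat 16 FH := by
    apply BitVec.eq_of_toNat_eq
    simp only [BitVec.toNat_setWidth, BitVec.toNat_ofNat]
    omega
  have e2 : (BitVec.ofNat 16 FH).toNat = FH := by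
    rw [BitVec.toNat_ofNat]
    omega
  have e3 : (BitVec.ofNat 16 FH).msb = false := by
    rw [BitVec.msb_eq_decide, e2]
    exact decide_eq_false (by omega)
  have e4 : BitVec.signExtend 32 (BitVec.ofNat 16 FH) = BitVec.zeroExtend 32 (BitVec.ofNat 16 FH) := by
    exact BitVec.signExtend_eq_setWidth_of_msb_false e3
  rw [e0, e4, ofBV_eq_addr _ (by decide), BitVec.toNat_setWidth, e2]
  congr 1
  omega

/-- **V1 after `valid_bits -= n`** (0x110fb4 `sub eax, ebx`) on the path where the result is not negative (`js` not taken):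
`valid_bits ∈ [−1, 32]` before, `n ≤ 255` (a byte of `codeword_lengths`) ⇒ `valid_bits ≤ 32` after. -/
theorem valid_bits_sub_le (a b : BitVec 32) (ha : a ≤ 32#32 ∨ a = 4294967295#32) (hb : b ≤ 255#32)
    (hpos : (a - b).msb = false) : a - b ≤ 32#32 := by
  -- as numbers: `a − b` is computed modulo 2^32; a wrapped difference has its top bit set
  have hb' : b.toNat ≤ 255 := by
    have := BitVec.le_def.mp hb
    simpa using this
  have hsub : (a - b).toNat = (2 ^ 32 - b.toNat + a.toNat) % 2 ^ 32 := BitVec.toNat_sub a b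
  have hm : (a - b).toNat < 2 ^ 31 := by
    rw [BitVec.msb_eq_decide] at hpos
    have := of_decide_eq_false hpos
    omega
  have ha' : a.toNat ≤ 32 ∨ a.toNat = 4294967295 := by
    rcases ha with h | h
    · left
      have := BitVec.le_def.mp h
      simpa using this
    · right
      rw [h]
      rfl
  have hab := a.isLt
  apply BitVec.le_def.mpr
  show (a - b).toNat ≤ (32#32).toNat
  have e32 : (32#32 : BitVec 32).toNat = 32 := rfl
  rw [e32]
  omega

end Vorbis.Spec.vorbis_decode_packet_rest
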